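-- pv_equiv track=rewrite | github.com/alexandervoitsekhovich/HSE_coding_comp_2023 | 3_task.py | max_sublists
-- ===== SOURCE A (Python) =====
-- def max_sublists(array, k, s):
--     result = {}
--     dp = [array[0]]
--
--     for i in range(1, len(array)):
--         dp_i = max(dp[i - 1] + array[i], array[i])
--         dp.append(dp_i)
--
--     for i in range(len(array)):
--         for j in range(i + 1, len(array)):
--             sublist_sum = sum(array[i:j + 1])
--             sublist_len = j - i + 1
--             if sublist_len < len(array):
--                 if sublist_len not in result:
--                     result[sublist_len] = sublist_sum
--                 else:
--                     result[sublist_len] = max(result[sublist_len], sublist_sum)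
--
--     for i in range(len(array) - 1):
--         if i + 1 not in result:
--             result[i + 1] = dp[i]
--         else:
--             result[i + 1] = max(result[i + 1], dp[i])
--
--     return result
-- ===== SOURCE B (Python) =====
-- def max_sublists(array, k, s):
--     n = len(array)
--     prefix = [0]
--     for x in array:
--         prefix.append(prefix[-1] + x)
--     dp = []
--     for x in array:
--         dp.append(x if not dp else max(dp[-1] + x, x))
--     result = {}
--     for L in range(2, n):
--         best = prefix[L] - prefix[0]
--         for i in range(1, n - L + 1):
--             best = max(best, prefix[i + L] - prefix[i])
--         result[L] = max(best, dp[L - 1])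
--     if n > 1:
--         result[1] = dp[0]
--     return result
-- ===== Notes on version B (the rewrite author's own statement) =====
-- stated objective: faster
-- what changed: B precomputes a prefix-sum table and iterates length-major (per sublist length, sliding the start), so every window sum is an O(1) prefix difference instead of A's O(n) sum(array[i:j+1]) inside a start-major double loop; the Kadane dp merge and the dict key order (2..n-1, then 1) are preserved.
import Mathlib
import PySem

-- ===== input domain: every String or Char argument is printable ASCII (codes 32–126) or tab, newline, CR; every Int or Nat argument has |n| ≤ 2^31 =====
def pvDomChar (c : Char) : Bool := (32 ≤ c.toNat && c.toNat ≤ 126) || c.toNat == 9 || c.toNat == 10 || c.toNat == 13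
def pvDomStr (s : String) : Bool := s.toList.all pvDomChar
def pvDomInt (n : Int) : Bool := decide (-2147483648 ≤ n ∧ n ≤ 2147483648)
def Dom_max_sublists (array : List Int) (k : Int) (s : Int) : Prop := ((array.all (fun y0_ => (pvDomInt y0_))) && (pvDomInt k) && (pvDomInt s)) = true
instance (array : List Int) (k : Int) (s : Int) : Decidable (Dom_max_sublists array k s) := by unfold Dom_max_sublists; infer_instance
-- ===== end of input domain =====

-- B replaces A's O(n) sum(array[i:j+1]) inside a start-major double loop by a prefix-sum table
-- and a length-major sweep (objective: faster, O(n^3) -> O(n^2)); same return value and dict order.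


-- ===== PORT A =====
def max_sublists (array : List Int) (k : Int) (s : Int) : List (Int × Int) :=
  let n : Int := PySem.List.len array
  -- dp = [array[0]]; for i in range(1, len(array)): dp.append(max(dp[i-1] + array[i], array[i]))
  -- (pyGetD is exact under Pre_: array ≠ [] and every index is in range)
  let dp : List Int := (PySem.List.pyRange 1 n 1).foldl
    (fun dp i =>
      let dp_i := max (PySem.List.pyGetD dp (i - 1) 0 + PySem.List.pyGetD array i 0)
                      (PySem.List.pyGetD array i 0)
      dp ++ [dp_i])
    [PySem.List.pyGetD array 0 0]
  -- double loop over starts i, ends j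
  let result : PySem.Dict Int Int := (PySem.List.pyRange 0 n 1).foldl
    (fun result i =>
      (PySem.List.pyRange (i + 1) n 1).foldl
        (fun result j =>
          let sublist_sum := (PySem.List.slice array (some i) (some (j + 1))).sum
          let sublist_len := j - i + 1
          if sublist_len < n then
            if result.contains sublist_len = false then
              result.insert sublist_len sublist_sum
            else
              result.insert sublist_len (max (result.getD sublist_len 0) sublist_sum)
          else result)
        result)
    PySem.Dict.empty
  -- for i in range(len(array) - 1): merge dp[i] at key i+1
  let result := (PySem.List.pyRange 0 (n - 1) 1).foldl
    (fun result i =>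
      if result.contains (i + 1) = false then
        result.insert (i + 1) (PySem.List.pyGetD dp i 0)
      else
        result.insert (i + 1) (max (result.getD (i + 1) 0) (PySem.List.pyGetD dp i 0)))
    result
  result.items

-- ===== PORT B =====
def max_sublists_alt (array : List Int) (k : Int) (s : Int) : List (Int × Int) :=
  let n : Int := PySem.List.len array
  -- prefix = [0]; for x in array: prefix.append(prefix[-1] + x)
  let prefix_ : List Int := array.foldl
    (fun p x => p ++ [PySem.List.pyGetD p (-1) 0 + x]) [0]
  -- dp = []; for x in array: dp.append(x if not dp else max(dp[-1] + x, x))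
  let dp : List Int := array.foldl
    (fun dp x => dp ++ [if dp = [] then x else max (PySem.List.pyGetD dp (-1) 0 + x) x]) []
  -- length-major sweep with O(1) window sums
  let result : PySem.Dict Int Int := (PySem.List.pyRange 2 n 1).foldl
    (fun result L =>
      let best0 := PySem.List.pyGetD prefix_ L 0 - PySem.List.pyGetD prefix_ 0 0
      let best := (PySem.List.pyRange 1 (n - L + 1) 1).foldl
        (fun best i => max best (PySem.List.pyGetD prefix_ (i + L) 0 - PySem.List.pyGetD prefix_ i 0))
        best0
      result.insert L (max best (PySem.List.pyGetD dp (L - 1) 0)))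
    PySem.Dict.empty
  let result := if 1 < n then result.insert 1 (PySem.List.pyGetD dp 0 0) else result
  result.items

-- ===== PRECONDITION & SPEC =====
-- Pre_ excludes exactly the empty list, on which A raises IndexError at array[0].
def Pre_max_sublists (array : List Int) (k : Int) (s : Int) : Prop := array ≠ []
instance (array : List Int) (k : Int) (s : Int) : Decidable (Pre_max_sublists array k s) := by
  unfold Pre_max_sublists; infer_instance

def pvWitness_max_sublists : List Int × Int × Int := ([1, -2, 3, 4], 0, 0)

def Spec_max_sublists (array : List Int) (k : Int) (s : Int) (out : List (Int × Int)) : Prop := out = max_sublists_alt array k s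
instance (array : List Int) (k : Int) (s : Int) (out : List (Int × Int)) : Decidable (Spec_max_sublists array k s out) := by unfold Spec_max_sublists; infer_instance

-- ===== CLAIM (what is proved, stated in full; the proofs are below) =====
def Claim_equal_max_sublists : Prop := ∀ (array : List Int) (k : Int) (s : Int), Dom_max_sublists array k s → Pre_max_sublists array k s → Spec_max_sublists array k s (max_sublists array k s)

-- ===== LEMMAS AND PROOFS =====

-- canonical objects
def pvP (a : List Int) (m : Nat) : Int := (a.take m).sum
def pvW (a : List Int) (i L : Nat) : Int := pvP a (i+L) - pvP a i
def pvBest (a : List Int) (L : Nat) : Int :=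
  (List.range (a.length - L)).foldl (fun b t => max b (pvW a (t+1) L)) (pvW a 0 L)
def pvKGo (best : Int) : List Int → List Int
  | [] => []
  | x :: xs => max (best + x) x :: pvKGo (max (best + x) x) xs
def pvK : List Int → List Int
  | [] => []
  | x :: xs => x :: pvKGo x xs
def pvDP (a : List Int) (t : Nat) : Int := (pvK a).getD t 0
def pvRMg (N : Nat) (g : Nat → Int) : List (Int × Int) :=
  (List.range (N-2)).map (fun (t : Nat) => (((t:Int)+2), g (t+2)))
def pvGpart (a : List Int) (i L : Nat) : Int :=
  (List.range (min i (a.length - L))).foldl (fun b t => max b (pvW a (t+1) L)) (pvW a 0 L)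
def pvOut (a : List Int) : List (Int × Int) :=
  pvRMg a.length (fun L => max (pvBest a L) (pvDP a (L-1)))
    ++ (if 2 ≤ a.length then [((1:Int), pvDP a 0)] else [])

theorem pv_sum_take_drop (a : List Int) (i L : Nat) :
    ((a.drop i).take L).sum = pvP a (i+L) - pvP a i := by
  have h := @List.take_add Int a i L
  simp [pvP, h]

theorem pvKGo_snoc (best x : Int) (xs : List Int) :
    pvKGo best (xs ++ [x]) = pvKGo best xs ++ [max ((pvKGo best xs).getLastD best + x) x] := by
  induction xs generalizing best with
  | nil => simp [pvKGo]
  | cons y ys ih => simp only [List.cons_append, pvKGo, ih, List.getLastD_cons]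

theorem pvKGo_length (best : Int) (xs : List Int) : (pvKGo best xs).length = xs.length := by
  induction xs generalizing best with
  | nil => rfl
  | cons y ys ih => simp [pvKGo, ih]

theorem pvK_length (a : List Int) : (pvK a).length = a.length := by
  cases a with
  | nil => rfl
  | cons x t => simp [pvK, pvKGo_length]

theorem pvK_snoc (x : Int) (ys : List Int) (h : ys ≠ []) :
    pvK (ys ++ [x]) = pvK ys ++ [max ((pvK ys).getLastD 0 + x) x] := by
  cases ys with
  | nil => simp at h
  | cons y t => simp only [List.cons_append, pvK, pvKGo_snoc, List.getLastD_cons]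

theorem pv_getD_last (l : List Int) (h : l ≠ []) : l.getD (l.length - 1) 0 = l.getLastD 0 := by
  induction l with
  | nil => simp at h
  | cons x t ih =>
      cases t with
      | nil => simp
      | cons y u => simpa using ih (by simp)

theorem pv_ne_nil_of_snoc {l : List Int} {x : Int} : l ++ [x] ≠ [] := by simp

theorem pv_dpB_go (xs : List Int) :
    ∀ (dp0 : List Int), dp0 ≠ [] →
    xs.foldl (fun dp x => dp ++ [if dp = [] then x else max (PySem.List.pyGetD dp (-1) 0 + x) x]) dp0
      = dp0 ++ pvKGo (dp0.getLastD 0) xs := by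
  induction xs with
  | nil => intro dp0 h; simp [pvKGo]
  | cons x t ih =>
      intro dp0 h
      have hlast : PySem.List.pyGetD dp0 (-1) 0 = dp0.getLastD 0 := by
        rw [PySem.List.pyGetD_neg_one dp0 0 h]
        cases dp0 with
        | nil => simp at h
        | cons y u => rw [List.getLast_eq_getLastD, List.getLastD_cons]
      simp only [List.foldl_cons, if_neg h, hlast]
      rw [ih (dp0 ++ [max (dp0.getLastD 0 + x) x]) pv_ne_nil_of_snoc]
      simp [pvKGo]

theorem pv_dpB (a : List Int) :
    a.foldl (fun dp x => dp ++ [if dp = [] then x else max (PySem.List.pyGetD dp (-1) 0 + x) x]) []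
      = pvK a := by
  cases a with
  | nil => rfl
  | cons x t =>
      have hstep : List.foldl (fun dp x => dp ++ [if dp = [] then x else max (PySem.List.pyGetD dp (-1) 0 + x) x]) [] (x :: t)
          = List.foldl (fun dp x => dp ++ [if dp = [] then x else max (PySem.List.pyGetD dp (-1) 0 + x) x]) [x] t := by
        simp
      rw [hstep, pv_dpB_go t [x] (by simp)]
      simp [pvK]

theorem pv_prefB (a : List Int) :
    a.foldl (fun p x => p ++ [PySem.List.pyGetD p (-1) 0 + x]) [0]
      = (List.range (a.length + 1)).map (pvP a) := by
  induction a using List.reverseRecOn with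
  | nil => simp [pvP]
  | append_singleton ys x ih =>
      rw [List.foldl_append, ih]
      have hsplit : (List.range (ys.length + 1)).map (pvP ys)
          = (List.range ys.length).map (pvP ys) ++ [pvP ys ys.length] := by
        rw [List.range_succ, List.map_append]; rfl
      simp only [List.foldl_cons, List.foldl_nil]
      rw [hsplit, PySem.List.pyGetD_neg_one_append_singleton]
      have hlen : (ys ++ [x]).length + 1 = (ys.length + 1) + 1 := by simp
      rw [hlen, List.range_succ, List.map_append]
      rw [List.range_succ, List.map_append]
      congr 1
      · congr 1
        · apply List.map_congr_left
          intro j hj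
          have hj' : j < ys.length := by simpa using hj
          simp [pvP, List.take_append_of_le_length (le_of_lt hj')]
        · simp [pvP, List.take_append_of_le_length (le_refl ys.length)]
      · simp [pvP, List.take_of_length_le (show (ys ++ [x]).length ≤ ys.length + 1 by simp)]

theorem pv_dpA_aux (a : List Int) (h : a ≠ []) :
    ∀ m, m + 1 ≤ a.length →
    (List.range m).foldl
      (fun dp (k : Nat) => dp ++ [max (PySem.List.pyGetD dp ((1+(k:Int))-1) 0 + PySem.List.pyGetD a (1+(k:Int)) 0)
                              (PySem.List.pyGetD a (1+(k:Int)) 0)])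
      [PySem.List.pyGetD a 0 0] = pvK (a.take (m+1)) := by
  intro m
  induction m with
  | zero =>
      intro _
      cases a with
      | nil => exact absurd rfl h
      | cons x t => simp [PySem.List.pyGetD_zero_cons, pvK, pvKGo]
  | succ m ih =>
      intro hm
      rw [List.range_succ, List.foldl_append, ih (by omega)]
      simp only [List.foldl_cons, List.foldl_nil]
      have h1 : (1:Int) + (m:Int) - 1 = ((m : Nat) : Int) := by ring
      have h2 : (1:Int) + (m:Int) = (((m+1) : Nat) : Int) := by push_cast; ring
      rw [h1, h2, PySem.List.pyGetD_natCast, PySem.List.pyGetD_natCast]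
      have hm1 : m + 1 < a.length := by omega
      have hlen : (pvK (a.take (m+1))).length = m + 1 := by
        rw [pvK_length, List.length_take]; omega
      have hne : pvK (a.take (m+1)) ≠ [] := by
        intro hc; rw [hc] at hlen; simp at hlen
      have hgd : (pvK (a.take (m+1))).getD m 0 = (pvK (a.take (m+1))).getLastD 0 := by
        have := pv_getD_last (pvK (a.take (m+1))) hne
        rw [hlen] at this; simpa using this
      have htake : a.take (m+1+1) = a.take (m+1) ++ [a[m+1]] := by
        rw [List.take_add_one, List.getElem?_eq_getElem hm1]; rfl
      have hget : a.getD (m+1) 0 = a[m+1] := List.getD_eq_getElem a 0 hm1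
      rw [hgd, hget, htake, pvK_snoc _ _ (by
        intro hc
        have hl0 : (a.take (m+1)).length = 0 := by rw [hc]; rfl
        rw [List.length_take] at hl0; omega)]

theorem pv_dpA (a : List Int) (h : a ≠ []) :
    (PySem.List.pyRange 1 (a.length:Int) 1).foldl
      (fun dp i => dp ++ [max (PySem.List.pyGetD dp (i-1) 0 + PySem.List.pyGetD a i 0)
                              (PySem.List.pyGetD a i 0)])
      [PySem.List.pyGetD a 0 0] = pvK a := by
  have hlen : ((a.length:Int) - 1).toNat = a.length - 1 := by omega
  rw [PySem.List.pyRange_one, hlen, List.foldl_map]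
  have h1 : 1 ≤ a.length := List.length_pos_iff.mpr h
  have := pv_dpA_aux a h (a.length - 1) (by omega)
  rw [this]
  congr 1
  rw [Nat.sub_add_cancel h1, List.take_length]

theorem pvRMg_congr {N : Nat} {g g' : Nat → Int} (h : ∀ t, t < N - 2 → g (t+2) = g' (t+2)) :
    pvRMg N g = pvRMg N g' := by
  unfold pvRMg
  apply List.map_congr_left
  intro t ht
  rw [h t (List.mem_range.mp ht)]

theorem pvRMg_keys (N : Nat) (g : Nat → Int) :
    (pvRMg N g).map Prod.fst = (List.range (N-2)).map (fun (t : Nat) => ((t:Int)+2)) := by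
  simp [pvRMg]

theorem pvRMg_keys_nodup (N : Nat) (g : Nat → Int) : ((pvRMg N g).map Prod.fst).Nodup := by
  rw [pvRMg_keys]
  exact List.Nodup.map (fun x y hxy => by omega) List.nodup_range

theorem pvRMg_mem {N : Nat} (g : Nat → Int) {t : Nat} (ht : t < N - 2) :
    (((t:Int)+2), g (t+2)) ∈ pvRMg N g := by
  unfold pvRMg
  exact List.mem_map.mpr ⟨t, List.mem_range.mpr ht, rfl⟩

theorem pv_mem_rmKeys {N : Nat} {K : Int} :
    K ∈ (List.range (N-2)).map (fun (t : Nat) => ((t:Int)+2)) ↔ (2 ≤ K ∧ K < N) := by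
  simp only [List.mem_map, List.mem_range]
  constructor
  · rintro ⟨t, ht, rfl⟩; omega
  · intro hK
    exact ⟨(K - 2).toNat, by omega, by omega⟩

theorem pv_contains_of_items {d : PySem.Dict Int Int} {X : List (Int × Int)} (hd : d.items = X) (K : Int) :
    d.contains K = decide (K ∈ X.map Prod.fst) := by
  rw [PySem.Dict.contains_eq_decide_mem_keys]
  simp only [PySem.Dict.keys]
  simp [hd]

theorem pvRMg_update (N : Nat) (g : Nat → Int) (L : Nat) (v : Int) :
    (pvRMg N g).map (fun p => if p.1 == ((L:Int)) then (((L:Int)), v) else p)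
      = pvRMg N (fun L' => if L' = L then v else g L') := by
  unfold pvRMg
  rw [List.map_map]
  apply List.map_congr_left
  intro t ht
  simp only [Function.comp]
  by_cases hteq : t + 2 = L
  · have : ((t:Int)+2) == ((L:Int)) := by simp; omega
    simp only [this, if_pos, hteq]
    simp
    omega
  · have : (((t:Int)+2) == ((L:Int))) = false := by simp; omega
    simp only [this, Bool.false_eq_true, if_false, hteq]

theorem pv_getD_of_items {d : PySem.Dict Int Int} {X : List (Int × Int)} (hd : d.items = X)
    (hnd : (X.map Prod.fst).Nodup) {K v : Int} (hmem : (K, v) ∈ X) : d.getD K 0 = v := by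
  apply PySem.Dict.getD_of_mem_items
  · rw [hd]; exact hmem
  · show d.keys.Nodup
    simp only [PySem.Dict.keys, hd]
    simpa using hnd

def pvBodyA (a : List Int) (i : Int) (result : PySem.Dict Int Int) (j : Int) : PySem.Dict Int Int :=
  if j - i + 1 < ((a.length : Int)) then
    if result.contains (j - i + 1) = false then
      result.insert (j - i + 1) ((PySem.List.slice a (some i) (some (j + 1))).sum)
    else
      result.insert (j - i + 1) (max (result.getD (j - i + 1) 0) ((PySem.List.slice a (some i) (some (j + 1))).sum))
  else result

def pvBodyC (dp : List Int) (result : PySem.Dict Int Int) (i : Int) : PySem.Dict Int Int :=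
  if result.contains (i + 1) = false then result.insert (i + 1) (PySem.List.pyGetD dp i 0)
  else result.insert (i + 1) (max (result.getD (i + 1) 0) (PySem.List.pyGetD dp i 0))

theorem pvBodyA_step_fresh {a : List Int} {i j : Int} {d : PySem.Dict Int Int} {X : List (Int × Int)}
    (hd : d.items = X) (hlt : j - i + 1 < ((a.length : Int))) (hcont : d.contains (j - i + 1) = false) :
    (pvBodyA a i d j).items = X ++ [(j - i + 1, (PySem.List.slice a (some i) (some (j+1))).sum)] := by
  unfold pvBodyA
  rw [if_pos hlt, hcont, if_pos rfl, PySem.Dict.items_insert_of_not_contains _ _ hcont, hd]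

theorem pvBodyA_step_upd {a : List Int} {i j : Int} {d : PySem.Dict Int Int} {X : List (Int × Int)}
    (hd : d.items = X) (hlt : j - i + 1 < ((a.length : Int))) (hcont : d.contains (j - i + 1) = true) :
    (pvBodyA a i d j).items
      = X.map (fun p => if p.1 == (j - i + 1) then
          (j - i + 1, max (d.getD (j - i + 1) 0) ((PySem.List.slice a (some i) (some (j+1))).sum)) else p) := by
  unfold pvBodyA
  rw [if_pos hlt, hcont, if_neg (by simp), PySem.Dict.items_insert_of_contains _ _ hcont, hd]

theorem pvBodyA_step_skip {a : List Int} {i j : Int} {d : PySem.Dict Int Int}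
    (hlt : ¬ (j - i + 1 < ((a.length : Int)))) : pvBodyA a i d j = d := by
  unfold pvBodyA
  rw [if_neg hlt]

theorem pv_phase0_aux (a : List Int) :
    ∀ m, m ≤ a.length - 2 →
    ((List.range m).foldl (fun result (k : Nat) => pvBodyA a 0 result (1 + (k:Int))) PySem.Dict.empty).items
      = pvRMg (m+2) (fun L => pvW a 0 L) := by
  intro m
  induction m with
  | zero =>
      intro _
      simp only [List.range_zero, List.foldl_nil]
      show ([] : List (Int × Int)) = _
      simp [pvRMg]
  | succ m ih =>
      intro hm
      rw [List.range_succ, List.foldl_append]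
      simp only [List.foldl_cons, List.foldl_nil]
      have hd := ih (by omega)
      have hkey : (1 + (m:Int)) - 0 + 1 = (((m+2) : Nat) : Int) := by push_cast; ring
      have hlt : (1 + (m:Int)) - 0 + 1 < ((a.length : Int)) := by
        rw [hkey]
        have : m + 2 < a.length := by omega
        exact_mod_cast this
      have hcont : ((List.range m).foldl (fun result (k : Nat) => pvBodyA a 0 result (1 + (k:Int))) PySem.Dict.empty).contains ((1 + (m:Int)) - 0 + 1) = false := by
        rw [hkey, pv_contains_of_items hd, pvRMg_keys]
        simp only [decide_eq_false_iff_not]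
        rw [pv_mem_rmKeys]
        push_cast
        omega
      rw [pvBodyA_step_fresh hd hlt hcont, hkey]
      have hb : (1:Int) + (m:Int) + 1 = (((m+2) : Nat) : Int) := by push_cast; ring
      rw [hb, PySem.List.slice_zero_start, PySem.List.slice_to_natCast]
      have hsum : ((a.take (m+2)).sum) = pvW a 0 (m+2) := by
        simp [pvW, pvP]
      rw [hsum]
      unfold pvRMg
      rw [show m + 1 + 2 - 2 = m + 1 from rfl, show m + 2 - 2 = m from rfl, List.range_succ, List.map_append]
      norm_cast

theorem pv_phase0 (a : List Int) (h : a ≠ []) :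
    ((List.range (a.length - 1)).foldl (fun result (k : Nat) => pvBodyA a 0 result (1 + (k:Int))) PySem.Dict.empty).items
      = pvRMg a.length (fun L => pvW a 0 L) := by
  rcases Nat.lt_or_ge a.length 2 with h2 | h2
  · have h1 : a.length = 1 := by
      have := List.length_pos_iff.mpr h; omega
    rw [h1]
    rw [show (1:Nat) - 1 = 0 from rfl]
    simp only [List.range_zero, List.foldl_nil]
    show ([] : List (Int × Int)) = _
    simp [pvRMg]
  · have hs : a.length - 1 = (a.length - 2) + 1 := by omega
    rw [hs, List.range_succ, List.foldl_append]
    simp only [List.foldl_cons, List.foldl_nil]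
    have hd := pv_phase0_aux a (a.length - 2) (le_refl _)
    have hc : ((a.length - 2 : Nat) : Int) = (a.length : Int) - 2 := by omega
    have hskip : ¬ ((1 + ((a.length - 2 : Nat) : Int)) - 0 + 1 < ((a.length : Int))) := by
      rw [hc]; omega
    rw [pvBodyA_step_skip hskip, hd]
    congr 1
    omega

theorem pv_inner_aux (a : List Int) (i : Nat) (hi : 1 ≤ i) (hiN : i ≤ a.length - 1)
    (d : PySem.Dict Int Int) (g : Nat → Int) (hd : d.items = pvRMg a.length g) :
    ∀ m, m ≤ a.length - 1 - i →
    ((List.range m).foldl (fun result (k : Nat) => pvBodyA a (i:Int) result ((i:Int) + 1 + (k:Int))) d).items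
      = pvRMg a.length (fun L => if 2 ≤ L ∧ L < m + 2 then max (g L) (pvW a i L) else g L) := by
  intro m
  induction m with
  | zero =>
      intro _
      simp only [List.range_zero, List.foldl_nil]
      rw [hd]
      exact pvRMg_congr (fun t ht => by
        rw [if_neg (by omega)])
  | succ m ih =>
      intro hm
      rw [List.range_succ, List.foldl_append]
      simp only [List.foldl_cons, List.foldl_nil]
      have hdm := ih (by omega)
      have hkey : ((i:Int) + 1 + (m:Int)) - (i:Int) + 1 = (((m+2) : Nat) : Int) := by push_cast; ring
      have hmlt : m + 2 < a.length := by omega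
      have hlt : ((i:Int) + 1 + (m:Int)) - (i:Int) + 1 < ((a.length:Int)) := by
        rw [hkey]; exact_mod_cast hmlt
      have hcont : ((List.range m).foldl (fun result (k : Nat) => pvBodyA a (i:Int) result ((i:Int) + 1 + (k:Int))) d).contains (((i:Int) + 1 + (m:Int)) - (i:Int) + 1) = true := by
        rw [hkey, pv_contains_of_items hdm, pvRMg_keys]
        rw [decide_eq_true_eq, pv_mem_rmKeys]
        push_cast
        omega
      have hmm : (((m+2):Nat):Int) = ((m:Int)+2) := by push_cast; ring
      have hgm : (if 2 ≤ m+2 ∧ m+2 < m + 2 then max (g (m+2)) (pvW a i (m+2)) else g (m+2)) = g (m+2) := by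
        rw [if_neg (by omega)]
      have hgd : ((List.range m).foldl (fun result (k : Nat) => pvBodyA a (i:Int) result ((i:Int) + 1 + (k:Int))) d).getD ((((m+2):Nat):Int)) 0 = g (m+2) := by
        rw [hmm]
        have hmem := pvRMg_mem (N := a.length)
          (fun L => if 2 ≤ L ∧ L < m + 2 then max (g L) (pvW a i L) else g L) (t := m) (by omega)
        have hmem2 : (((m:Int)+2), g (m+2)) ∈ pvRMg a.length (fun L => if 2 ≤ L ∧ L < m + 2 then max (g L) (pvW a i L) else g L) := by
          simpa [hgm] using hmem
        exact pv_getD_of_items hdm (pvRMg_keys_nodup _ _) hmem2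
      have hbnd : (i:Int) + 1 + (m:Int) + 1 = ((i + (m+2) : Nat) : Int) := by push_cast; ring
      have hslice : ((PySem.List.slice a (some ((i:Int))) (some ((i:Int) + 1 + (m:Int) + 1))).sum) = pvW a i (m+2) := by
        rw [hbnd, PySem.List.slice_natCast, Nat.add_sub_cancel_left, pv_sum_take_drop]
        rfl
      rw [pvBodyA_step_upd hdm hlt hcont]
      simp only [hkey, hslice]
      simp only [hgd]
      rw [pvRMg_update]
      apply pvRMg_congr
      intro t ht
      by_cases hte : t + 2 = m + 2
      · rw [if_pos hte, hte, if_pos (by omega)]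
      · rw [if_neg hte]
        by_cases hlt2 : t + 2 < m + 2
        · rw [if_pos (by omega), if_pos (by omega)]
        · rw [if_neg (by omega), if_neg (by omega)]

theorem pv_inner (a : List Int) (i : Nat) (hi : 1 ≤ i) (hiN : i ≤ a.length - 1)
    (d : PySem.Dict Int Int) (g : Nat → Int) (hd : d.items = pvRMg a.length g) :
    ((List.range (a.length - 1 - i)).foldl (fun result (k : Nat) => pvBodyA a (i:Int) result ((i:Int) + 1 + (k:Int))) d).items
      = pvRMg a.length (fun L => if L ≤ a.length - i then max (g L) (pvW a i L) else g L) := by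
  rw [pv_inner_aux a i hi hiN d g hd (a.length - 1 - i) (le_refl _)]
  apply pvRMg_congr
  intro t ht
  by_cases hc : t + 2 ≤ a.length - i
  · rw [if_pos (by omega), if_pos hc]
  · rw [if_neg (by omega), if_neg hc]

theorem pvGpart_zero (a : List Int) (L : Nat) : pvGpart a 0 L = pvW a 0 L := by
  simp [pvGpart]

theorem pvGpart_succ (a : List Int) (m L : Nat) (h : m + 1 ≤ a.length - L) :
    pvGpart a (m+1) L = max (pvGpart a m L) (pvW a (m+1) L) := by
  unfold pvGpart
  rw [min_eq_left h, min_eq_left (by omega), List.range_succ, List.foldl_append]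
  simp only [List.foldl_cons, List.foldl_nil]

theorem pvGpart_stable (a : List Int) (m L : Nat) (h : a.length - L ≤ m) :
    pvGpart a (m+1) L = pvGpart a m L := by
  unfold pvGpart
  rw [min_eq_right (by omega), min_eq_right h]

theorem pv_outer_aux (a : List Int) (ha : a ≠ []) :
    ∀ m, 1 ≤ m → m ≤ a.length →
    ((List.range m).foldl
      (fun result (k0 : Nat) =>
        (PySem.List.pyRange ((0 + (k0:Int)) + 1) ((a.length:Int)) 1).foldl
          (fun result j => pvBodyA a (0 + (k0:Int)) result j) result)
      PySem.Dict.empty).items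
      = pvRMg a.length (pvGpart a (m-1)) := by
  intro m
  induction m with
  | zero => intro h1; omega
  | succ m ih =>
      intro _ hm
      rcases Nat.eq_zero_or_pos m with h0 | hpos
      · subst h0
        rw [List.range_one]
        simp only [List.foldl_cons, List.foldl_nil]
        simp only [Nat.cast_zero, add_zero, zero_add]
        rw [PySem.List.pyRange_one,
          show ((a.length:Int) - 1).toNat = a.length - 1 from by omega, List.foldl_map]
        rw [pv_phase0 a ha]
        exact pvRMg_congr (fun t ht => by rw [pvGpart_zero])
      · rw [List.range_succ, List.foldl_append]
        simp only [List.foldl_cons, List.foldl_nil]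
        have hd := ih hpos (by omega)
        simp only [show (0:Int) + (m:Int) = (m:Int) from by ring]
        rw [PySem.List.pyRange_one,
          show ((a.length:Int) - ((m:Int) + 1)).toNat = a.length - 1 - m from by omega,
          List.foldl_map]
        rw [pv_inner a m hpos (by omega) _ (pvGpart a (m-1)) hd]
        apply pvRMg_congr
        intro t ht
        by_cases hc : t + 2 ≤ a.length - m
        · rw [if_pos hc]
          rw [show m + 1 - 1 = (m - 1) + 1 from by omega, pvGpart_succ a (m-1) (t+2) (by omega)]
          rw [show m - 1 + 1 = m from by omega]
        · rw [if_neg hc]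
          rw [show m + 1 - 1 = (m - 1) + 1 from by omega, pvGpart_stable a (m-1) (t+2) (by omega)]

theorem pv_dict12 (a : List Int) (h : a ≠ []) :
    ((PySem.List.pyRange 0 ((a.length:Int)) 1).foldl
      (fun result i => (PySem.List.pyRange (i+1) ((a.length:Int)) 1).foldl
        (fun result j => pvBodyA a i result j) result)
      PySem.Dict.empty).items = pvRMg a.length (pvBest a) := by
  rw [PySem.List.pyRange_one,
    show ((a.length:Int) - 0).toNat = a.length from by omega, List.foldl_map]
  have h1 : 1 ≤ a.length := List.length_pos_iff.mpr h
  rw [pv_outer_aux a h a.length h1 (le_refl _)]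
  apply pvRMg_congr
  intro t ht
  unfold pvGpart pvBest
  rw [min_eq_right (by omega)]

theorem pvBodyC_step_fresh {dp : List Int} {i : Int} {d : PySem.Dict Int Int} {X : List (Int × Int)}
    (hd : d.items = X) (hcont : d.contains (i+1) = false) :
    (pvBodyC dp d i).items = X ++ [(i+1, PySem.List.pyGetD dp i 0)] := by
  unfold pvBodyC
  rw [hcont, if_pos rfl, PySem.Dict.items_insert_of_not_contains _ _ hcont, hd]

theorem pvBodyC_step_upd {dp : List Int} {i : Int} {d : PySem.Dict Int Int} {X : List (Int × Int)}
    (hd : d.items = X) (hcont : d.contains (i+1) = true) :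
    (pvBodyC dp d i).items
      = X.map (fun p => if p.1 == (i+1) then (i+1, max (d.getD (i+1) 0) (PySem.List.pyGetD dp i 0)) else p) := by
  unfold pvBodyC
  rw [hcont, if_neg (by simp), PySem.Dict.items_insert_of_contains _ _ hcont, hd]

theorem pv_keys3 (N : Nat) (g : Nat → Int) (c : Int) :
    ((pvRMg N g ++ [((1:Int), c)]).map Prod.fst)
      = (List.range (N-2)).map (fun (t : Nat) => ((t:Int)+2)) ++ [(1:Int)] := by
  rw [List.map_append, pvRMg_keys]
  rfl

theorem pv_keys3_nodup (N : Nat) (g : Nat → Int) (c : Int) :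
    ((pvRMg N g ++ [((1:Int), c)]).map Prod.fst).Nodup := by
  rw [pv_keys3]
  refine List.Nodup.append ?_ (by simp) ?_
  · exact List.Nodup.map (fun x y hxy => by omega) List.nodup_range
  · intro x hx hx1
    simp only [List.mem_singleton] at hx1
    simp only [List.mem_map, List.mem_range] at hx
    obtain ⟨t, _, rfl⟩ := hx
    omega

theorem pv_phase3_aux (a : List Int) (c : Int) (g : Nat → Int)
    (d : PySem.Dict Int Int) (hd : d.items = pvRMg a.length g ++ [((1:Int), c)]) :
    ∀ m, m ≤ a.length - 2 →
    ((List.range m).foldl (fun result (k : Nat) => pvBodyC (pvK a) result (0 + (((k+1):Nat):Int))) d).items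
      = pvRMg a.length (fun L => if 2 ≤ L ∧ L < m + 2 then max (g L) (pvDP a (L-1)) else g L) ++ [((1:Int), c)] := by
  intro m
  induction m with
  | zero =>
      intro _
      simp only [List.range_zero, List.foldl_nil]
      rw [hd,
        pvRMg_congr (N := a.length)
          (g := fun L => if 2 ≤ L ∧ L < 0 + 2 then max (g L) (pvDP a (L-1)) else g L) (g' := g)
          (fun t ht => by
            show (if 2 ≤ t+2 ∧ t+2 < 0 + 2 then max (g (t+2)) (pvDP a (t+2-1)) else g (t+2)) = g (t+2)
            rw [if_neg (by omega)])]
  | succ m ih =>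
      intro hm
      rw [List.range_succ, List.foldl_append]
      simp only [List.foldl_cons, List.foldl_nil]
      have hdm := ih (by omega)
      have hkey : (0:Int) + ((((m+1)):Nat):Int) + 1 = (((m+2) : Nat) : Int) := by push_cast; ring
      have hcont : ((List.range m).foldl (fun result (k : Nat) => pvBodyC (pvK a) result (0 + (((k+1):Nat):Int))) d).contains ((0:Int) + ((((m+1)):Nat):Int) + 1) = true := by
        rw [hkey, pv_contains_of_items hdm, pv_keys3]
        rw [decide_eq_true_eq, List.mem_append, pv_mem_rmKeys]
        push_cast
        omega
      have hmm : (((m+2):Nat):Int) = ((m:Int)+2) := by push_cast; ring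
      have hgm : (if 2 ≤ m+2 ∧ m+2 < m + 2 then max (g (m+2)) (pvDP a (m+2-1)) else g (m+2)) = g (m+2) := by
        rw [if_neg (by omega)]
      have hgd : ((List.range m).foldl (fun result (k : Nat) => pvBodyC (pvK a) result (0 + (((k+1):Nat):Int))) d).getD ((((m+2):Nat):Int)) 0 = g (m+2) := by
        rw [hmm]
        have hmem := pvRMg_mem (N := a.length)
          (fun L => if 2 ≤ L ∧ L < m + 2 then max (g L) (pvDP a (L-1)) else g L) (t := m) (by omega)
        have hmem2 : (((m:Int)+2), g (m+2)) ∈ pvRMg a.length (fun L => if 2 ≤ L ∧ L < m + 2 then max (g L) (pvDP a (L-1)) else g L) := by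
          simpa [hgm] using hmem
        exact pv_getD_of_items hdm (pv_keys3_nodup _ _ _) (List.mem_append_left _ hmem2)
      have hidx : (0:Int) + ((((m+1)):Nat):Int) = (((m+1):Nat):Int) := by push_cast; ring
      have hval : PySem.List.pyGetD (pvK a) ((0:Int) + ((((m+1)):Nat):Int)) 0 = pvDP a (m+1) := by
        rw [hidx, PySem.List.pyGetD_natCast]
        rfl
      rw [pvBodyC_step_upd hdm hcont]
      simp only [hkey, hval]
      simp only [hgd]
      rw [List.map_append, pvRMg_update]
      have h1ne : ((1:Int) == ((((m+2):Nat):Int))) = false := by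
        rw [beq_eq_false_iff_ne]
        intro hh
        omega
      have hsm : (List.map (fun p => if p.1 == ((((m+2):Nat):Int)) then (((((m+2):Nat):Int)), max (g (m+2)) (pvDP a (m+1))) else p) [((1:Int), c)]) = [((1:Int), c)] := by
        simp only [List.map_cons, List.map_nil, h1ne, Bool.false_eq_true, if_false]
      rw [hsm]
      congr 1
      apply pvRMg_congr
      intro t ht
      by_cases hte : t + 2 = m + 2
      · rw [if_pos hte, hte, if_pos (by omega)]
        rw [show m + 2 - 1 = m + 1 from by omega]
      · rw [if_neg hte]
        by_cases hlt2 : t + 2 < m + 2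
        · rw [if_pos (by omega), if_pos (by omega)]
        · rw [if_neg (by omega), if_neg (by omega)]

theorem pv_dict3 (a : List Int) (h2 : 2 ≤ a.length) (d : PySem.Dict Int Int) (g : Nat → Int)
    (hd : d.items = pvRMg a.length g) :
    ((PySem.List.pyRange 0 ((a.length:Int) - 1) 1).foldl (fun result i => pvBodyC (pvK a) result i) d).items
      = pvRMg a.length (fun L => max (g L) (pvDP a (L-1))) ++ [((1:Int), pvDP a 0)] := by
  rw [PySem.List.pyRange_one,
    show ((a.length:Int) - 1 - 0).toNat = a.length - 1 from by omega, List.foldl_map,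
    show a.length - 1 = (a.length - 2) + 1 from by omega, List.range_succ_eq_map]
  simp only [List.foldl_cons, List.foldl_map, Nat.succ_eq_add_one]
  have hcont1 : d.contains ((0:Int) + ((0:Nat):Int) + 1) = false := by
    rw [show (0:Int) + ((0:Nat):Int) + 1 = 1 from by norm_num]
    rw [pv_contains_of_items hd, pvRMg_keys, decide_eq_false_iff_not]
    intro hx
    simp only [List.mem_map, List.mem_range] at hx
    obtain ⟨t, _, ht⟩ := hx
    omega
  have hd1 : (pvBodyC (pvK a) d ((0:Int) + ((0:Nat):Int))).items
      = pvRMg a.length g ++ [((1:Int), pvDP a 0)] := by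
    have := pvBodyC_step_fresh (dp := pvK a) (i := (0:Int) + ((0:Nat):Int)) hd hcont1
    rw [this]
    rw [show (0:Int) + ((0:Nat):Int) = ((0:Nat):Int) from by norm_num,
      PySem.List.pyGetD_natCast]
    norm_num
    rfl
  rw [pv_phase3_aux a (pvDP a 0) g _ hd1 (a.length - 2) (le_refl _)]
  congr 1
  apply pvRMg_congr
  intro t ht
  rw [if_pos (by omega)]

theorem pv_A_eq (a : List Int) (kk ss : Int) (h : a ≠ []) :
    max_sublists a kk ss = pvOut a := by
  unfold max_sublists
  simp only [PySem.List.len_eq]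
  simp only [pv_dpA a h]
  rcases Nat.lt_or_ge a.length 2 with h2 | h2
  · have h1 : a.length = 1 := by
      have := List.length_pos_iff.mpr h; omega
    have hz : PySem.List.pyRange 0 ((a.length:Int) - 1) 1 = [] := by
      rw [PySem.List.pyRange_one, show (((a.length:Int) - 1) - 0).toNat = 0 from by omega]
      rfl
    rw [hz, List.foldl_nil]
    have hout : pvOut a = [] := by simp [pvOut, pvRMg, h1]
    have hrm : pvRMg a.length (pvBest a) = [] := by simp [pvRMg, h1]
    exact (pv_dict12 a h).trans (hrm.trans hout.symm)
  · have hout : pvOut a = pvRMg a.length (fun L => max (pvBest a L) (pvDP a (L-1))) ++ [((1:Int), pvDP a 0)] := by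
      unfold pvOut
      rw [if_pos h2]
    rw [hout]
    exact pv_dict3 a h2 _ (pvBest a) (pv_dict12 a h)

theorem pv_B_items (len : Nat) (v : Int → Int) :
    ((PySem.List.pyRange 2 (len:Int) 1).foldl (fun result L => result.insert L (v L)) PySem.Dict.empty).items
      = (PySem.List.pyRange 2 (len:Int) 1).map (fun L => (L, v L)) := by
  rw [PySem.Dict.items_foldl_insert_fresh (PySem.List.pyRange 2 (len:Int) 1) (fun (L:Int) => L) v PySem.Dict.empty
      (fun x hx => PySem.Dict.contains_empty x) (by simpa using PySem.List.nodup_pyRange_one 2 (len:Int))]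
  rw [show (PySem.Dict.empty : PySem.Dict Int Int).items = [] from rfl]
  simp

theorem pv_vB (a : List Int) (t : Nat) (ht : t < a.length - 2) :
    max ((PySem.List.pyRange 1 ((a.length:Int) - (2 + (t:Int)) + 1) 1).foldl
          (fun best i => max best (PySem.List.pyGetD ((List.range (a.length+1)).map (pvP a)) (i + (2 + (t:Int))) 0
                                  - PySem.List.pyGetD ((List.range (a.length+1)).map (pvP a)) i 0))
          (PySem.List.pyGetD ((List.range (a.length+1)).map (pvP a)) (2 + (t:Int)) 0
            - PySem.List.pyGetD ((List.range (a.length+1)).map (pvP a)) 0 0))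
        (PySem.List.pyGetD (pvK a) ((2 + (t:Int)) - 1) 0)
      = max (pvBest a (t+2)) (pvDP a (t+1)) := by
  have hdp : PySem.List.pyGetD (pvK a) ((2 + (t:Int)) - 1) 0 = pvDP a (t+1) := by
    rw [show (2 + (t:Int)) - 1 = (((t+1):Nat):Int) from by push_cast; ring, PySem.List.pyGetD_natCast]
    rfl
  have hinit : PySem.List.pyGetD ((List.range (a.length+1)).map (pvP a)) (2 + (t:Int)) 0
      - PySem.List.pyGetD ((List.range (a.length+1)).map (pvP a)) 0 0 = pvW a 0 (t+2) := by
    rw [show (2 + (t:Int)) = (((t+2):Nat):Int) from by push_cast; ring, PySem.List.pyGetD_natCast,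
      PySem.List.pyGetD_zero]
    rw [List.getD_eq_getElem?_getD, List.getElem?_map, List.getElem?_range (by omega)]
    rw [show ((List.range (a.length+1)).map (pvP a)).getD 0 0 = pvP a 0 from by
      rw [List.getD_eq_getElem?_getD, List.getElem?_map, List.getElem?_range (by omega)]; rfl]
    unfold pvW
    rw [Nat.zero_add]
    rfl
  rw [hdp, hinit]
  congr 1
  rw [PySem.List.pyRange_one,
    show (((a.length:Int) - (2 + (t:Int)) + 1) - 1).toNat = a.length - (t+2) from by omega,
    List.foldl_map]
  have hcongr := PySem.List.foldl_congr_mem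
    (l := List.range (a.length - (t+2))) (init := pvW a 0 (t+2))
    (f := fun b (k:Nat) => max b (PySem.List.pyGetD ((List.range (a.length+1)).map (pvP a)) (1 + (k:Int) + (2 + (t:Int))) 0
          - PySem.List.pyGetD ((List.range (a.length+1)).map (pvP a)) (1 + (k:Int)) 0))
    (g := fun b (k:Nat) => max b (pvW a (k+1) (t+2)))
    (by
      intro acc x hx
      have hxlt : x < a.length - (t+2) := List.mem_range.mp hx
      show max acc (PySem.List.pyGetD ((List.range (a.length+1)).map (pvP a)) (1 + (x:Int) + (2 + (t:Int))) 0
            - PySem.List.pyGetD ((List.range (a.length+1)).map (pvP a)) (1 + (x:Int)) 0)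
          = max acc (pvW a (x+1) (t+2))
      congr 1
      rw [show (1 + (x:Int)) + (2 + (t:Int)) = ((((x+1)+(t+2)):Nat):Int) from by push_cast; ring,
        show (1 + (x:Int)) = (((x+1):Nat):Int) from by push_cast; ring,
        PySem.List.pyGetD_natCast, PySem.List.pyGetD_natCast]
      rw [List.getD_eq_getElem?_getD, List.getElem?_map, List.getElem?_range (by omega)]
      rw [List.getD_eq_getElem?_getD, List.getElem?_map, List.getElem?_range (by omega)]
      rfl)
  rw [hcongr]
  rfl

theorem pv_B_final (len : Nat) (v : Int → Int) (c : Int) :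
    (((PySem.List.pyRange 2 (len:Int) 1).foldl (fun result L => result.insert L (v L)) PySem.Dict.empty).insert 1 c).items
      = (PySem.List.pyRange 2 (len:Int) 1).map (fun L => (L, v L)) ++ [((1:Int), c)] := by
  have hit := pv_B_items len v
  have hcont : ((PySem.List.pyRange 2 (len:Int) 1).foldl (fun result L => result.insert L (v L)) PySem.Dict.empty).contains 1 = false := by
    rw [pv_contains_of_items hit, decide_eq_false_iff_not]
    intro hx
    rw [List.mem_map] at hx
    obtain ⟨L, hL, hL1⟩ := hx
    rw [List.mem_map] at hL
    obtain ⟨L2, hL2, rfl⟩ := hL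
    have hmem := PySem.List.mem_pyRange_one.mp hL2
    simp only at hL1
    omega
  rw [PySem.Dict.items_insert_of_not_contains _ _ hcont, hit]

theorem pv_B_map_eq (a : List Int) (v : Int → Int) (w : Nat → Int)
    (hv : ∀ t, t < a.length - 2 → v (2 + (t:Int)) = w (t + 2)) :
    (PySem.List.pyRange 2 ((a.length:Int)) 1).map (fun L => (L, v L)) = pvRMg a.length w := by
  rw [PySem.List.pyRange_one, show ((a.length:Int) - 2).toNat = a.length - 2 from by omega, List.map_map]
  unfold pvRMg
  apply List.map_congr_left
  intro t ht
  have ht' := List.mem_range.mp ht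
  show ((2 + (t:Int)), v (2 + (t:Int))) = ((t:Int) + 2, w (t+2))
  rw [hv t ht', show (2 + (t:Int)) = (t:Int) + 2 from by ring]

theorem pv_B_eq (a : List Int) (kk ss : Int) (h : a ≠ []) :
    max_sublists_alt a kk ss = pvOut a := by
  unfold max_sublists_alt
  simp only [PySem.List.len_eq]
  simp only [pv_prefB a, pv_dpB a]
  rcases Nat.lt_or_ge a.length 2 with h2 | h2
  · have h1 : a.length = 1 := by
      have := List.length_pos_iff.mpr h; omega
    rw [if_neg (by omega : ¬ ((1:Int) < (a.length:Int)))]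
    have hz : PySem.List.pyRange 2 ((a.length:Int)) 1 = [] := by
      rw [PySem.List.pyRange_one, show ((a.length:Int) - 2).toNat = 0 from by omega]
      rfl
    rw [hz, List.foldl_nil]
    rw [show (PySem.Dict.empty : PySem.Dict Int Int).items = [] from rfl]
    simp [pvOut, pvRMg, h1]
  · rw [if_pos (by omega : ((1:Int) < (a.length:Int)))]
    rw [pv_B_final a.length]
    rw [pv_B_map_eq a _ (fun L => max (pvBest a L) (pvDP a (L-1)))
      (fun t ht => pv_vB a t ht)]
    rw [PySem.List.pyGetD_zero]
    unfold pvOut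
    rw [if_pos h2]
    rfl

-- ===== VERDICT (by name: the statement is the Claim_ definition above) =====
theorem max_sublists_spec : Claim_equal_max_sublists := by
  intro array k s _ hpre
  unfold Spec_max_sublists
  rw [pv_A_eq array k s hpre, pv_B_eq array k s hpre]
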